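-- pv_equiv track=rewrite | github.com/WinrichSy/Codewars_Solutions | Python/7kyu/SumOfNumbersFrom0ToN.py | show_sequence
-- ===== SOURCE A (Python) =====
-- def show_sequence(n):
--     if n<0:
--         return '{}<0'.format(n)
--     elif n==0:
--         return '0=0'
--
--     ans = [str(i) for i in range(n+1)]
--     ans = '+'.join(ans)
--
--     return '{} = {}'.format(ans,sum(range(n+1)))
-- ===== SOURCE B (Python) =====
-- def show_sequence(n):
--     if n < 0:
--         return '{}<0'.format(n)
--     if n == 0:
--         return '0=0'
--     s = '0'
--     total = 0
--     for i in range(1, n + 1):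
--         s += '+' + str(i)
--         total += i
--     return '{} = {}'.format(s, total)
-- ===== Notes on version B (the rewrite author's own statement) =====
-- stated objective: alternative
-- what changed: A makes two independent passes over the range (a str comprehension joined with '+', then sum of the range); B fuses them into a single loop that extends the '+'-joined string and accumulates the running total in the same iteration.
import Mathlib
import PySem

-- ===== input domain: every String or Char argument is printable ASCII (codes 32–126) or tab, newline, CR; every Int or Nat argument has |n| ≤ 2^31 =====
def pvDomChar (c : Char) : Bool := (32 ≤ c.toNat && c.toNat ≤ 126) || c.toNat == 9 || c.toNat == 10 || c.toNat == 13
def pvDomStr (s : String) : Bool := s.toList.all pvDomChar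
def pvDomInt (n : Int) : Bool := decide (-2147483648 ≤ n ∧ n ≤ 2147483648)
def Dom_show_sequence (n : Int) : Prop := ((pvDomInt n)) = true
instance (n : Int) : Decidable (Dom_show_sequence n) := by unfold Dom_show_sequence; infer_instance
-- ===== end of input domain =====

-- B fuses A's two passes (join of a str-comprehension, then sum(range)) into one loop
-- that extends the '+'-joined string and accumulates the running total together.


-- ===== PORT A =====
def show_sequence (n : Int) : String :=
  if n < 0 then
    PySem.Int.toStr n ++ "<0"
  else if n == 0 then
    "0=0"
  else
    let ans := (PySem.List.pyRange 0 (n+1) 1).map (fun i => PySem.Int.toStr i)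
    let ansJ := PySem.Str.join "+" ans
    ansJ ++ " = " ++ PySem.Int.toStr ((PySem.List.pyRange 0 (n+1) 1).foldl (· + ·) 0)

-- ===== PORT B =====
def show_sequence_alt (n : Int) : String :=
  if n < 0 then
    PySem.Int.toStr n ++ "<0"
  else if n == 0 then
    "0=0"
  else
    let st := (PySem.List.pyRange 1 (n+1) 1).foldl
      (fun (st : String × Int) i => (st.1 ++ "+" ++ PySem.Int.toStr i, st.2 + i))
      ("0", 0)
    st.1 ++ " = " ++ PySem.Int.toStr st.2

-- ===== PRECONDITION & SPEC =====
def Spec_show_sequence (n : Int) (out : String) : Prop := out = show_sequence_alt n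
instance (n : Int) (out : String) : Decidable (Spec_show_sequence n out) := by unfold Spec_show_sequence; infer_instance

-- ===== CLAIM (what is proved, stated in full; the proofs are below) =====
def Claim_equal_show_sequence : Prop := ∀ (n : Int), Dom_show_sequence n → Spec_show_sequence n (show_sequence n)

-- ===== LEMMAS AND PROOFS =====

-- B's fused fold over any list, split into its string and sum components.
theorem fused_fold (xs : List Int) (s0 : String) (t0 : Int) :
    xs.foldl (fun (st : String × Int) i => (st.1 ++ "+" ++ PySem.Int.toStr i, st.2 + i)) (s0, t0)
    = (xs.foldl (fun s i => s ++ "+" ++ PySem.Int.toStr i) s0, xs.foldl (· + ·) t0) := by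
  induction xs generalizing s0 t0 with
  | nil => rfl
  | cons x xs ih => simp [List.foldl, ih]

theorem chars_join_step (sep a b : List Char) (rest : List (List Char)) :
    PySem.Chars.join sep (a :: b :: rest) = PySem.Chars.join sep ((a ++ sep ++ b) :: rest) := by
  cases rest with
  | nil =>
    rw [PySem.Chars.join_cons_cons, PySem.Chars.join_singleton, PySem.Chars.join_singleton]
  | cons c rs =>
    rw [PySem.Chars.join_cons_cons, PySem.Chars.join_cons_cons, PySem.Chars.join_cons_cons]
    simp

-- join "+" over a nonempty list of strings equals the left fold that appends "+w" for each tail element.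
theorem join_eq_foldl (a : String) (rest : List String) :
    PySem.Str.join "+" (a :: rest) = rest.foldl (fun s w => s ++ "+" ++ w) a := by
  induction rest generalizing a with
  | nil =>
    simp only [List.foldl, PySem.Str.join, List.map_cons, List.map_nil,
      PySem.Chars.join_singleton]
    simp
  | cons b rest ih =>
    simp only [List.foldl]
    rw [← ih]
    simp only [PySem.Str.join]
    apply congrArg
    rw [List.map_cons, List.map_cons, chars_join_step]
    have h : (a ++ "+" ++ b).toList = a.toList ++ "+".toList ++ b.toList := by simp
    rw [List.map_cons, ← h]

theorem range_split (n : Int) (h : 0 < n) :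
    PySem.List.pyRange 0 (n+1) 1 = 0 :: PySem.List.pyRange 1 (n+1) 1 := by
  rw [PySem.List.pyRange_one_cons (by omega)]
  norm_num

theorem foldl_map_str (xs : List Int) (s0 : String) :
    (xs.map (fun i => PySem.Int.toStr i)).foldl (fun s w => s ++ "+" ++ w) s0
    = xs.foldl (fun s i => s ++ "+" ++ PySem.Int.toStr i) s0 := by
  induction xs generalizing s0 with
  | nil => rfl
  | cons x xs ih => simp [List.foldl, ih]

-- ===== VERDICT (by name: the statement is the Claim_ definition above) =====
theorem show_sequence_spec : Claim_equal_show_sequence := by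
  intro n _
  unfold Spec_show_sequence show_sequence show_sequence_alt
  by_cases h1 : n < 0
  · simp [h1]
  · by_cases h2 : n = 0
    · simp [h2]
    · have hpos : 0 < n := by omega
      simp only [h1, if_false, h2, beq_iff_eq, if_false]
      rw [range_split n hpos, fused_fold]
      simp only [List.map_cons, join_eq_foldl, foldl_map_str]
      have : PySem.Int.toStr 0 = "0" := by decide
      rw [this]
      simp [List.foldl]
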